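-- pv_equiv track=rewrite | github.com/YagoRizzetti/AlgoritmosYEstructurasDeDatos1 | SegundoParcial/practicap2.py | controlpsv
-- ===== SOURCE A (Python) =====
-- def esVocal(x):
--     v = "aeiou"
--     esvocal = False
--     if x in v:
--         esvocal = True
--     return esvocal
--
-- def controlpsv(x):
--     countpsv = 0
--     tienev = False
--     for i in x:
--         if i == " " or i == ".":
--             if tienev == False:
--                 countpsv += 1
--             tienev = False
--         else:
--             ev = esVocal(i)
--             if ev:
--                 tienev = True
--     return countpsv
-- ===== SOURCE B (Python) =====
-- def controlpsv(x):
--     tokens = x.replace('.', ' ').split(' ')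
--     return sum(1 for t in tokens[:-1] if not any(c in 'aeiou' for c in t))
-- ===== Notes on version B (the rewrite author's own statement) =====
-- stated objective: simpler
-- what changed: Replaces the streaming per-character state machine (vowel-seen flag reset at each delimiter) with a build-then-test decomposition: normalize period delimiters to space, split into tokens with str.split, drop the final unterminated token, and count vowel-free tokens.
import Mathlib
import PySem

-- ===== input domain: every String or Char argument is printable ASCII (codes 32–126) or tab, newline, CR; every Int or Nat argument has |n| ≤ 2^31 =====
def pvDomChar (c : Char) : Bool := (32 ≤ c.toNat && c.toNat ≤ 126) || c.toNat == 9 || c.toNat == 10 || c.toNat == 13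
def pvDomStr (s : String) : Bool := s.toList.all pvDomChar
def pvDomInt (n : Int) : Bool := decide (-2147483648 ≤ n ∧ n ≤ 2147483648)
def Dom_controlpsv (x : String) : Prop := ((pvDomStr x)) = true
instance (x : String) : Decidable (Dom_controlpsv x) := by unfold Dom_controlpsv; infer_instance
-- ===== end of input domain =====

-- B replaces A's streaming vowel-flag state machine by split-into-tokens-then-count; objective: simpler.

-- ===== PORT A =====
-- 'x in v' for the single character x is exact char membership in "aeiou"
def esVocal (x : Char) : Bool :=
  let v : List Char := ['a', 'e', 'i', 'o', 'u']
  let esvocal := false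
  let esvocal := if v.contains x then true else esvocal
  esvocal

def controlpsv (x : String) : Int :=
  let r := x.toList.foldl
    (fun (s : Int × Bool) i =>
      if i == ' ' || i == '.' then
        ((if s.2 == false then s.1 + 1 else s.1), false)
      else
        (s.1, if esVocal i then true else s.2))
    (0, false)
  r.1

-- ===== PORT B =====
def controlpsv_alt (x : String) : Int :=
  let tokens := PySem.Chars.splitOn (PySem.Str.replace x "." " ").toList [' ']
  -- sum(1 for t in tokens[:-1] if not any(c in 'aeiou' for c in t))
  (((PySem.List.slice tokens none (some (-1))).filter
      (fun t => !(t.any (fun c => ['a', 'e', 'i', 'o', 'u'].contains c)))).length : Int)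

-- ===== PRECONDITION & SPEC =====
def Spec_controlpsv (x : String) (out : Int) : Prop := out = controlpsv_alt x
instance (x : String) (out : Int) : Decidable (Spec_controlpsv x out) := by unfold Spec_controlpsv; infer_instance

-- ===== CLAIM (what is proved, stated in full; the proofs are below) =====
def Claim_equal_controlpsv : Prop := ∀ (x : String), Dom_controlpsv x → Spec_controlpsv x (controlpsv x)

-- ===== LEMMAS AND PROOFS =====

def pvSub (c : Char) : Char := if c = '.' then ' ' else c

def pvIsV (c : Char) : Bool := ['a', 'e', 'i', 'o', 'u'].contains c

def pvSplit : List Char → List Char → List (List Char)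
  | cur, [] => [cur]
  | cur, c :: rest => if c = ' ' then cur :: pvSplit [] rest else pvSplit (cur ++ [c]) rest

def pvCount (ts : List (List Char)) : Int :=
  ((ts.filter (fun t => !(t.any pvIsV))).length : Int)

theorem pvPrefixChar (a c : Char) (rest : List Char) :
    List.isPrefixOf [a] (c :: rest) = (a == c) := by
  show (a == c && List.isPrefixOf [] rest) = (a == c)
  simp [List.isPrefixOf]

theorem pvReplaceGo (l : List Char) : ∀ (fuel : Nat) (acc : List Char), l.length ≤ fuel →
    PySem.Chars.replace.go ['.'] [' '] fuel l acc = acc.reverse ++ l.map pvSub := by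
  induction l with
  | nil =>
    intro fuel acc h
    cases fuel <;> simp [PySem.Chars.replace.go]
  | cons c rest ih =>
    intro fuel acc h
    cases fuel with
    | zero => simp at h
    | succ fuel =>
      by_cases hc : c = '.'
      · subst hc
        have hp : List.isPrefixOf ['.'] ('.' :: rest) = true := by
          rw [pvPrefixChar]; simp
        have hdrop : List.drop (['.'].length) ('.' :: rest) = rest := by simp
        simp only [PySem.Chars.replace.go, hp, if_pos, hdrop]
        rw [ih fuel _ (by simpa using h)]
        simp [pvSub]
      · have hp : List.isPrefixOf ['.'] (c :: rest) = false := by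
          rw [pvPrefixChar]; simp [Ne.symm hc]
        simp only [PySem.Chars.replace.go, hp, Bool.false_eq_true, if_neg]
        rw [ih fuel _ (by simpa using h)]
        simp [pvSub, hc]

theorem pvReplaceEq (s : List Char) :
    PySem.Chars.replace s ['.'] [' '] = s.map pvSub := by
  simp [PySem.Chars.replace]
  rw [pvReplaceGo s s.length [] (le_refl _)]
  simp

theorem pvSplitGo (l : List Char) : ∀ (fuel : Nat) (cur : List Char) (acc : List (List Char)), l.length + 1 ≤ fuel →
    PySem.Chars.splitOn.go [' '] fuel l cur acc = acc.reverse ++ pvSplit cur.reverse l := by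
  induction l with
  | nil =>
    intro fuel cur acc h
    cases fuel with
    | zero => simp at h
    | succ fuel => simp [PySem.Chars.splitOn.go, pvSplit]
  | cons c rest ih =>
    intro fuel cur acc h
    cases fuel with
    | zero => simp at h
    | succ fuel =>
      by_cases hc : c = ' '
      · subst hc
        have hp : List.isPrefixOf [' '] (' ' :: rest) = true := by
          rw [pvPrefixChar]; simp
        have hdrop : List.drop ([' '].length) (' ' :: rest) = rest := by simp
        simp only [PySem.Chars.splitOn.go, hp, if_pos, hdrop]
        rw [ih fuel _ _ (by simpa using h)]
        simp [pvSplit]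
      · have hp : List.isPrefixOf [' '] (c :: rest) = false := by
          rw [pvPrefixChar]; simp [Ne.symm hc]
        simp only [PySem.Chars.splitOn.go, hp, Bool.false_eq_true, if_neg]
        rw [ih fuel _ _ (by simpa using h)]
        simp [pvSplit, hc]

theorem pvSplitOnEq (s : List Char) :
    PySem.Chars.splitOn s [' '] = pvSplit [] s := by
  simp [PySem.Chars.splitOn]
  rw [pvSplitGo s (s.length + 1) [] [] (le_refl _)]
  simp

theorem pvSplit_ne_nil (l cur : List Char) : pvSplit cur l ≠ [] := by
  induction l generalizing cur with
  | nil => simp [pvSplit]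
  | cons c rest ih => by_cases hc : c = ' ' <;> simp [pvSplit, hc, ih]

theorem pvCount_cons (t : List Char) (ts : List (List Char)) :
    pvCount (t :: ts) = (if t.any pvIsV then 0 else 1) + pvCount ts := by
  by_cases h : t.any pvIsV <;> simp [pvCount, h] <;> push_cast <;> ring

theorem pvMain (l : List Char) : ∀ (cnt : Int) (cur : List Char),
    (l.foldl
      (fun (s : Int × Bool) i =>
        if i == ' ' || i == '.' then
          ((if s.2 == false then s.1 + 1 else s.1), false)
        else
          (s.1, if esVocal i then true else s.2))
      (cnt, cur.any pvIsV)).1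
    = cnt + pvCount ((pvSplit cur (l.map pvSub)).dropLast) := by
  induction l with
  | nil => intro cnt cur; simp [pvSplit, pvCount]
  | cons c rest ih =>
    intro cnt cur
    by_cases hd : c = ' ' ∨ c = '.'
    · have hsub : pvSub c = ' ' := by
        rcases hd with h | h <;> simp [pvSub, h]
      have hc : (c == ' ' || c == '.') = true := by
        rcases hd with h | h <;> simp [h]
      simp only [List.foldl_cons, hc, if_pos, List.map_cons, hsub]
      have hfalse : false = List.any [] pvIsV := rfl
      rw [show ((if (cur.any pvIsV) == false then cnt + 1 else cnt, false) : Int × Bool)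
            = ((if (cur.any pvIsV) == false then cnt + 1 else cnt), List.any [] pvIsV) from rfl]
      rw [ih _ []]
      have hM := pvSplit_ne_nil (rest.map pvSub) []
      rw [show pvSplit cur (' ' :: rest.map pvSub) = cur :: pvSplit [] (rest.map pvSub) by
        simp [pvSplit]]
      rw [List.dropLast_cons_of_ne_nil hM, pvCount_cons]
      by_cases hv : cur.any pvIsV <;> simp [hv] <;> ring
    · push_neg at hd
      have hc : (c == ' ' || c == '.') = false := by
        simp [hd.1, hd.2]
      have hsub : pvSub c = c := by simp [pvSub, hd.2]
      have hvoc : (if esVocal c then true else cur.any pvIsV) = (cur ++ [c]).any pvIsV := by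
        by_cases h : esVocal c
        · have : pvIsV c = true := by
            simpa [esVocal, pvIsV] using h
          simp [h, this]
        · have : pvIsV c = false := by
            by_contra hh
            exact h (by simpa [esVocal, pvIsV] using (Bool.not_eq_false _).mp hh)
          simp [h, this]
      simp only [List.foldl_cons, hc, Bool.false_eq_true, if_false, List.map_cons, hsub]
      rw [show ((cnt, if esVocal c then true else cur.any pvIsV) : Int × Bool)
            = (cnt, (cur ++ [c]).any pvIsV) by rw [hvoc]]
      rw [ih cnt (cur ++ [c])]
      rw [show pvSplit cur (c :: rest.map pvSub) = pvSplit (cur ++ [c]) (rest.map pvSub) by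
        simp [pvSplit, hd.1]]

-- ===== VERDICT (by name: the statement is the Claim_ definition above) =====
theorem controlpsv_spec : Claim_equal_controlpsv := by
  intro x _
  unfold Spec_controlpsv controlpsv controlpsv_alt
  have hrepl : (PySem.Str.replace x "." " ").toList = x.toList.map pvSub := by
    rw [PySem.Str.toList_replace]
    have : ("." : String).toList = ['.'] := rfl
    have h2 : (" " : String).toList = [' '] := rfl
    rw [this, h2, pvReplaceEq]
  simp only [hrepl]
  rw [show PySem.Chars.splitOn (x.toList.map pvSub) [' '] = pvSplit [] (x.toList.map pvSub) from
    pvSplitOnEq _]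
  rw [PySem.List.slice_to_neg_one]
  have := pvMain x.toList 0 []
  simp only [List.any_nil] at this
  rw [this]
  have hfun : pvIsV = (fun c => ['a', 'e', 'i', 'o', 'u'].contains c) := rfl
  rw [pvCount, hfun]
  simp
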